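-- pv_equiv track=rewrite | github.com/kuznetsovvj/education | algorithms/codeforces/1829b.py | check
-- ===== SOURCE A (Python) =====
-- def check(seq):
--     m, c = 0, 0
--     for item in seq:
--         if not item:
--             c += 1
--         else:
--             m, c = max(m, c), 0
--     m = max(m, c)
--     return m
-- ===== SOURCE B (Python) =====
-- def check(seq):
--     i, n, best = 0, len(seq), 0
--     while i < n:
--         if seq[i]:
--             i += 1
--         else:
--             j = i
--             while j < n and not seq[j]:
--                 j += 1
--             if j - i > best:
--                 best = j - i
--             i = j
--     return best
-- ===== Notes on version B (the rewrite author's own statement) =====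
-- stated objective: alternative
-- what changed: Replaces the running-counter-with-reset fold by a run-scanning decomposition: an outer scan that, at each falsy element, consumes the whole maximal falsy run with an inner scan and takes the max of run lengths.
import Mathlib
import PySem

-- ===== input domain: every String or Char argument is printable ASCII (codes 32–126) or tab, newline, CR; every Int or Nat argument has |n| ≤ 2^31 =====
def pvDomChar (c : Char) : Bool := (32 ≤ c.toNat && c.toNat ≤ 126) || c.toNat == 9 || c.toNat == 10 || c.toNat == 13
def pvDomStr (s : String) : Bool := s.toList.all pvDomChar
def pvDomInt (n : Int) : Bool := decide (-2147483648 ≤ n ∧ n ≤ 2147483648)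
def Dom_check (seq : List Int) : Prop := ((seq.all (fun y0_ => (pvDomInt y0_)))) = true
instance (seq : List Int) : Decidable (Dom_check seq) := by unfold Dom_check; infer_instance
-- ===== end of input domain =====

-- B replaces A's running-counter-with-reset fold by a run-scanning decomposition
-- (consume each maximal falsy run, take the max of run lengths); alternative, same cost.

-- ===== PORT A =====
-- fold over the items carrying (m, c), exactly A's loop; then a final max m c
def check (seq : List Int) : Int :=
  let p := seq.foldl (fun (p : Int × Int) item =>
    if item = 0 then (p.1, p.2 + 1) else (max p.1 p.2, 0)) (0, 0)
  max p.1 p.2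

-- ===== PORT B =====
-- Source B's outer index loop becomes recursion on the list; the inner `while` that
-- advances j over the falsy run is takeWhile/dropWhile on the remaining suffix.
def check_altGo : List Int → Int
  | [] => 0
  | x :: xs =>
    if x = 0 then
      -- inner loop: scan the maximal run of falsy items starting here
      let runLen : Int := 1 + ((xs.takeWhile (fun y => y = 0)).length : Int)
      let rest := xs.dropWhile (fun y => y = 0)
      max runLen (check_altGo rest)
    else
      check_altGo xs
termination_by l => l.length
decreasing_by
  · exact Nat.lt_succ_of_le (List.length_dropWhile_le _ _)
  · simp

def check_alt (seq : List Int) : Int := check_altGo seq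

-- ===== PRECONDITION & SPEC =====
def Spec_check (seq : List Int) (out : Int) : Prop := out = check_alt seq
instance (seq : List Int) (out : Int) : Decidable (Spec_check seq out) := by unfold Spec_check; infer_instance

-- ===== CLAIM (what is proved, stated in full; the proofs are below) =====
def Claim_equal_check : Prop := ∀ (seq : List Int), Dom_check seq → Spec_check seq (check seq)

-- ===== LEMMAS AND PROOFS =====

-- carry-style characterisation of A's fold: best run with the current run already c long
def runMax (c : Int) : List Int → Int
  | [] => c
  | x :: xs => if x = 0 then runMax (c + 1) xs else max c (runMax 0 xs)

theorem check_fold_runMax (l : List Int) : ∀ m c : Int,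
    (let p := l.foldl (fun (p : Int × Int) item =>
      if item = 0 then (p.1, p.2 + 1) else (max p.1 p.2, 0)) (m, c)
     max p.1 p.2) = max m (runMax c l) := by
  induction l with
  | nil => intro m c; simp [runMax]
  | cons x xs ih =>
    intro m c
    by_cases hx : x = 0
    · simpa [runMax, hx] using ih m (c + 1)
    · simp only [List.foldl_cons, runMax, hx, if_false]
      rw [ih (max m c) 0]
      omega

theorem check_altGo_nonneg (l : List Int) : 0 ≤ check_altGo l := by
  induction l using check_altGo.induct with
  | case1 => simp [check_altGo]
  | case2 xs rest ih =>
    simp only [check_altGo, if_pos (Eq.refl (0 : Int))]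
    exact le_max_of_le_right ih
  | case3 x xs hx ih =>
    simpa [check_altGo, hx] using ih

-- one-step unfolding of B in takeWhile/dropWhile form, valid for every list
theorem check_altGo_eq (l : List Int) :
    check_altGo l = max (((l.takeWhile (fun y => y = 0)).length : Int))
      (check_altGo (l.dropWhile (fun y => y = 0))) := by
  match l with
  | [] => simp [check_altGo]
  | x :: xs =>
    by_cases hx : x = 0
    · simp [check_altGo, hx]
      ring_nf
    · simp [check_altGo, hx]
      exact check_altGo_nonneg _

theorem runMax_eq (l : List Int) : ∀ c : Int, 0 ≤ c →
    runMax c l = max (c + ((l.takeWhile (fun y => y = 0)).length : Int))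
      (check_altGo (l.dropWhile (fun y => y = 0))) := by
  induction l with
  | nil =>
    intro c hc
    simp [runMax, check_altGo]
    omega
  | cons x xs ih =>
    intro c hc
    by_cases hx : x = 0
    · simp only [runMax, if_pos hx]
      rw [ih (c + 1) (by omega)]
      simp [hx]
      ring_nf
    · simp only [runMax, if_neg hx]
      rw [ih 0 le_rfl]
      simp only [zero_add]
      rw [← check_altGo_eq xs]
      simp [check_altGo, hx]

-- ===== VERDICT (by name: the statement is the Claim_ definition above) =====
theorem check_spec : Claim_equal_check := by
  intro seq _
  show check seq = check_alt seq
  unfold check check_alt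
  rw [check_fold_runMax seq 0 0, runMax_eq seq 0 le_rfl, zero_add,
    ← check_altGo_eq seq]
  have := check_altGo_nonneg seq
  omega
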